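-- pv_equiv track=rewrite | github.com/mozz01/Python_practice | warmup-2/string_match/answer_1.py | string_match
-- ===== SOURCE A (Python) =====
-- def string_match(a, b):
--   a_substrings = set()
--   b_substrings = set()
--
--   for i in range(len(a) - 1):
--     a_substrings.add(a[i:i+2])
--
--   for i in range(len(b) - 1):
--     b_substrings.add(b[i:i+2])
--
--   return len(a_substrings.intersection(b_substrings))
-- ===== SOURCE B (Python) =====
-- def string_match(a, b):
--   xs = sorted({a[i:i+2] for i in range(len(a) - 1)})
--   ys = sorted({b[i:i+2] for i in range(len(b) - 1)})
--   i = j = n = 0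
--   while i < len(xs) and j < len(ys):
--     if xs[i] == ys[j]:
--       n += 1
--       i += 1
--       j += 1
--     elif xs[i] < ys[j]:
--       i += 1
--     else:
--       j += 1
--   return n
-- ===== Notes on version B (the rewrite author's own statement) =====
-- stated objective: alternative
-- what changed: Replaces the hash-set intersection with a sort-and-merge: each string's distinct bigrams are sorted and the two sorted lists are walked with two pointers, counting equal elements.
import Mathlib
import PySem

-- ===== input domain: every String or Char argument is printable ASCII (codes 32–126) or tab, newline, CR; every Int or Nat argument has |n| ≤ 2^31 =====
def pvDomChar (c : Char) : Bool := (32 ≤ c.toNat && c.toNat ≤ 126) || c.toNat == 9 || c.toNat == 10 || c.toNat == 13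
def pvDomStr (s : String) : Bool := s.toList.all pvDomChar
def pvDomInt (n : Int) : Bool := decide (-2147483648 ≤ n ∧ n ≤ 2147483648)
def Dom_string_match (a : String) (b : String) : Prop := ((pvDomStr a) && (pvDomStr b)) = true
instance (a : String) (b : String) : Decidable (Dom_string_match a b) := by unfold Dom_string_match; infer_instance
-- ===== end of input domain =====

-- B replaces A's hash-set intersection by sorting each string's distinct bigrams and
-- counting common elements with a two-pointer merge (alternative algorithm, same cost class).

-- ===== PORT A =====
def string_match (a : String) (b : String) : Int :=
  let aSub := (PySem.List.pyRange 0 (PySem.Str.len a - 1) 1).foldl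
      (fun s i => PySem.Set.add s (PySem.Str.slice a (some i) (some (i + 2)))) PySem.Set.empty
  let bSub := (PySem.List.pyRange 0 (PySem.Str.len b - 1) 1).foldl
      (fun s i => PySem.Set.add s (PySem.Str.slice b (some i) (some (i + 2)))) PySem.Set.empty
  PySem.Set.len (PySem.Set.inter aSub bSub)

-- ===== PORT B =====
-- the two-pointer while loop of Source B, as recursion on the two sorted lists
def smMerge : List String → List String → Int
  | [], _ => 0
  | _ :: _, [] => 0
  | x :: xs, y :: ys =>
    if x = y then 1 + smMerge xs ys
    else if x < y then smMerge xs (y :: ys)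
    else smMerge (x :: xs) ys
termination_by xs ys => xs.length + ys.length

def string_match_alt (a : String) (b : String) : Int :=
  let xs := PySem.List.sorted (PySem.Set.ofList
      ((PySem.List.pyRange 0 (PySem.Str.len a - 1) 1).map
        (fun i => PySem.Str.slice a (some i) (some (i + 2))))) (fun x => x)
  let ys := PySem.List.sorted (PySem.Set.ofList
      ((PySem.List.pyRange 0 (PySem.Str.len b - 1) 1).map
        (fun i => PySem.Str.slice b (some i) (some (i + 2))))) (fun x => x)
  smMerge xs ys

-- ===== PRECONDITION & SPEC =====
def Spec_string_match (a : String) (b : String) (out : Int) : Prop := out = string_match_alt a b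
instance (a : String) (b : String) (out : Int) : Decidable (Spec_string_match a b out) := by unfold Spec_string_match; infer_instance

-- ===== CLAIM (what is proved, stated in full; the proofs are below) =====
def Claim_equal_string_match : Prop := ∀ (a : String) (b : String), Dom_string_match a b → Spec_string_match a b (string_match a b)

-- ===== LEMMAS AND PROOFS =====

-- building a set by adding f i for each i is set(map f l)
theorem foldl_add_eq_ofList (l : List Int) (f : Int → String) :
    l.foldl (fun s i => PySem.Set.add s (f i)) PySem.Set.empty
      = PySem.Set.ofList (l.map f) := by
  rw [PySem.Set.ofList_eq_foldl, List.foldl_map]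
  rfl

-- merge-count of two strictly increasing lists = number of elements of the first occurring in the second
theorem smMerge_eq_filter (la lb : List String)
    (ha : la.Pairwise (· < ·)) (hb : lb.Pairwise (· < ·)) :
    smMerge la lb = ((la.filter (fun x => decide (x ∈ lb))).length : Int) := by
  induction la, lb using smMerge.induct with
  | case1 lb => simp [smMerge]
  | case2 x xs => simp [smMerge]
  | case3 xs y ys ih =>
    have hxs : ∀ z ∈ xs, y < z := (List.pairwise_cons.mp ha).1
    have hfc : xs.filter (fun z => decide (z ∈ y :: ys)) = xs.filter (fun z => decide (z ∈ ys)) := by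
      apply List.filter_congr
      intro z hz
      have hne : z ≠ y := ne_of_gt (hxs z hz)
      simp [hne]
    rw [smMerge, if_pos rfl, ih (List.pairwise_cons.mp ha).2 (List.pairwise_cons.mp hb).2]
    rw [List.filter_cons_of_pos (by simp), hfc]
    rw [List.length_cons]
    push_cast
    omega
  | case4 x xs y ys hne hlt ih =>
    have hys : ∀ z ∈ ys, y < z := (List.pairwise_cons.mp hb).1
    have hx : (decide (x ∈ y :: ys)) = false := by
      simp only [List.mem_cons, decide_eq_false_iff_not]
      rintro (h | h)
      · exact hne h
      · exact absurd hlt (not_lt.mpr (hys x h).le)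
    rw [smMerge, if_neg hne, if_pos hlt, ih (List.pairwise_cons.mp ha).2 hb]
    rw [List.filter_cons_of_neg (by simp only [hx]; exact Bool.false_ne_true)]
  | case5 x xs y ys hne hnlt ih =>
    have hgt : y < x := lt_of_le_of_ne (not_lt.mp hnlt) (fun h => hne h.symm)
    have hxs : ∀ z ∈ xs, x < z := (List.pairwise_cons.mp ha).1
    have hfc : (x :: xs).filter (fun z => decide (z ∈ y :: ys))
        = (x :: xs).filter (fun z => decide (z ∈ ys)) := by
      apply List.filter_congr
      intro z hz
      have hzy : z ≠ y := by
        rcases List.mem_cons.mp hz with h | h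
        · exact h ▸ ne_of_gt hgt
        · exact ne_of_gt (lt_trans hgt (hxs z h))
      simp [hzy]
    rw [smMerge, if_neg hne, if_neg hnlt, ih ha (List.pairwise_cons.mp hb).2, hfc]

-- counting members of sb among sa is invariant under sorting both sides
theorem filter_sorted_len (sa sb : List String) :
    (((PySem.List.sorted sa (fun x => x)).filter
        (fun x => decide (x ∈ PySem.List.sorted sb (fun x => x)))).length : Int)
      = ((sa.filter (fun x => decide (x ∈ sb))).length : Int) := by
  have h1 : (PySem.List.sorted sa (fun x => x)).filter
        (fun x => decide (x ∈ PySem.List.sorted sb (fun x => x)))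
      = (PySem.List.sorted sa (fun x => x)).filter (fun x => decide (x ∈ sb)) := by
    apply List.filter_congr
    intro z _
    simp [PySem.List.mem_sorted]
  rw [h1]
  exact_mod_cast List.Perm.length_eq
    ((PySem.List.sorted_perm sa (fun x => x) false).filter (fun x => decide (x ∈ sb)))

-- ===== VERDICT (by name: the statement is the Claim_ definition above) =====
theorem string_match_spec : Claim_equal_string_match := by
  intro a b _
  unfold Spec_string_match string_match string_match_alt
  rw [foldl_add_eq_ofList, foldl_add_eq_ofList]
  set ca := (PySem.List.pyRange 0 (PySem.Str.len a - 1) 1).map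
      (fun i => PySem.Str.slice a (some i) (some (i + 2)))
  set cb := (PySem.List.pyRange 0 (PySem.Str.len b - 1) 1).map
      (fun i => PySem.Str.slice b (some i) (some (i + 2)))
  rw [smMerge_eq_filter _ _ (PySem.List.sorted_ofList_pairwise_lt ca)
    (PySem.List.sorted_ofList_pairwise_lt cb)]
  rw [filter_sorted_len]
  simp [PySem.Set.len, PySem.Set.inter, PySem.Set.contains]
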